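-- pv_equiv track=rewrite | github.com/jorgeandres-220/Tarea-1-BMC | Tarea#1_BMC 2.0.py | ADNaARN
-- ===== SOURCE A (Python) =====
-- valoresADN = ['A', 'C', 'T', 'G']
--
-- def verificadorADN(cadena):
--     for valor in cadena:
--         if valor not in valoresADN:
--             return False
--     return True
--
-- def ADNaARN(cadena):
--     result = ""
--     if(verificadorADN(cadena)):
--         for valor in cadena:
--             if(valor == "T"):
--                 result += "U"
--             else:
--                 result += valor
--     return result
-- ===== SOURCE B (Python) =====
-- def ADNaARN(cadena):
--     # single pass: validate and transcribe together, early return "" on any invalid char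
--     result = ""
--     for valor in cadena:
--         if valor not in ('A', 'C', 'T', 'G'):
--             return ""
--         result += "U" if valor == "T" else valor
--     return result
-- ===== Notes on version B (the rewrite author's own statement) =====
-- stated objective: simpler
-- what changed: Fused A's two passes (full validation scan, then transcription scan) into one scan that transcribes as it validates and early-returns "" at the first invalid character.
import Mathlib
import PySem

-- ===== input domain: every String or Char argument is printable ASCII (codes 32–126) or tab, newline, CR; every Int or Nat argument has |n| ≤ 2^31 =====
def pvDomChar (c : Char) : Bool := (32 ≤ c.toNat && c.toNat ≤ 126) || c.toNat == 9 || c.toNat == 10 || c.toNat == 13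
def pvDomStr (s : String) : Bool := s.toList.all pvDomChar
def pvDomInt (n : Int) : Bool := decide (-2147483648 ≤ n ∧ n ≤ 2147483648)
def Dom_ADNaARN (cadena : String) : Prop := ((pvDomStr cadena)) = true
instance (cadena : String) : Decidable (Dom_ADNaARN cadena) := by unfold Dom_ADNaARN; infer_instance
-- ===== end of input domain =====

-- B fuses A's validate-then-transcribe two passes into one early-returning pass; objective: simpler.

-- ===== PORT A =====
def valoresADN : List Char := ['A', 'C', 'T', 'G']

def verificadorADN (cadena : String) : Bool :=
  cadena.toList.foldr (fun valor rest => if valor ∉ valoresADN then false else rest) true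

def ADNaARN (cadena : String) : String :=
  let result := ""
  if verificadorADN cadena then
    cadena.toList.foldl
      (fun result valor => if valor = 'T' then result ++ "U" else result.push valor) result
  else result

-- ===== PORT B =====
def ADNaARN_altGo : List Char → String → String
  | [], result => result
  | valor :: rest, result =>
    if valor ∉ ['A', 'C', 'T', 'G'] then ""
    else ADNaARN_altGo rest (if valor = 'T' then result ++ "U" else result.push valor)

def ADNaARN_alt (cadena : String) : String := ADNaARN_altGo cadena.toList ""

-- ===== PRECONDITION & SPEC =====
def Spec_ADNaARN (cadena : String) (out : String) : Prop := out = ADNaARN_alt cadena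
instance (cadena : String) (out : String) : Decidable (Spec_ADNaARN cadena out) := by unfold Spec_ADNaARN; infer_instance

-- ===== CLAIM (what is proved, stated in full; the proofs are below) =====
def Claim_equal_ADNaARN : Prop := ∀ (cadena : String), Dom_ADNaARN cadena → Spec_ADNaARN cadena (ADNaARN cadena)

-- ===== LEMMAS AND PROOFS =====
theorem altGo_eq (l : List Char) (acc : String) :
    ADNaARN_altGo l acc =
      if l.foldr (fun valor rest => if valor ∉ valoresADN then false else rest) true then
        l.foldl (fun result valor => if valor = 'T' then result ++ "U" else result.push valor) acc
      else "" := by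
  induction l generalizing acc with
  | nil => simp [ADNaARN_altGo]
  | cons c cs ih =>
    simp only [ADNaARN_altGo, List.foldr, List.foldl, valoresADN]
    by_cases h : c ∈ (['A', 'C', 'T', 'G'] : List Char) <;> simp [h, ih, valoresADN]

-- ===== VERDICT (by name: the statement is the Claim_ definition above) =====
theorem ADNaARN_spec : Claim_equal_ADNaARN := by
  intro cadena _
  unfold Spec_ADNaARN ADNaARN ADNaARN_alt verificadorADN
  rw [altGo_eq]
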